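-- pv_equiv track=rewrite | github.com/zikram013/PythonParadigmas | HojaSieteDeEjercicios.py | converionNotasDiccionario
-- ===== SOURCE A (Python) =====
-- def converionNotasDiccionario(diccionario):
--     diccionarioNotasConversion={}
--     for asignatura,nota in diccionario.items():
--         if nota<5:
--             diccionarioNotasConversion[asignatura.lower()]="Suspenso"
--         elif nota>=5 and nota<7:
--             diccionarioNotasConversion[asignatura.lower()]="Aprobado"
--         elif nota>=7 and nota<9:
--             diccionarioNotasConversion[asignatura.lower()]="Notable"
--         elif nota>=9 and nota<=10:
--            diccionarioNotasConversion[asignatura.lower()]="Sobresaliente"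
--     return diccionarioNotasConversion
-- ===== SOURCE B (Python) =====
-- import bisect
--
-- _THRESHOLDS = [5, 7, 9]
-- _LABELS = ["Suspenso", "Aprobado", "Notable", "Sobresaliente"]
--
-- def converionNotasDiccionario(diccionario):
--     resultado = {}
--     for asignatura, nota in diccionario.items():
--         if nota <= 10:
--             resultado[asignatura.lower()] = _LABELS[bisect.bisect_right(_THRESHOLDS, nota)]
--     return resultado
-- ===== Notes on version B (the rewrite author's own statement) =====
-- stated objective: idiomatic
-- what changed: Replaced the if/elif grade cascade with a bisect_right binary search over a sorted threshold table [5,7,9] and a parallel label list, skipping only grades above 10.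
import Mathlib
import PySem

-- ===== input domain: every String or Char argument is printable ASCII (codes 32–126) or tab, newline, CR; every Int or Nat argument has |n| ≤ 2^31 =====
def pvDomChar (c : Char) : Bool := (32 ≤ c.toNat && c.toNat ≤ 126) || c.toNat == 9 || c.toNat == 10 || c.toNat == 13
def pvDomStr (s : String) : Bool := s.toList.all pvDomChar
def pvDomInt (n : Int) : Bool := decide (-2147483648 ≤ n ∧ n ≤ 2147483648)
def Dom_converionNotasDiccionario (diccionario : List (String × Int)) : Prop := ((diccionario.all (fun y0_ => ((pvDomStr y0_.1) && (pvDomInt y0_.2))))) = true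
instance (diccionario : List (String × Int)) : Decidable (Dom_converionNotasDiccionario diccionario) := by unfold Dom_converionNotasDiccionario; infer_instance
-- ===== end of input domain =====

-- B replaces A's if/elif grade cascade by a bisect_right lookup in a sorted threshold
-- table with a parallel label list (objective: idiomatic table-driven form, same cost).

-- ===== PORT A =====
def converionNotasDiccionario (diccionario : List (String × Int)) : List (String × String) :=
  (diccionario.foldl (fun d p =>
    let asignatura := p.1
    let nota := p.2
    if nota < 5 then d.insert (PySem.Str.lower asignatura) "Suspenso"
    else if 5 ≤ nota ∧ nota < 7 then d.insert (PySem.Str.lower asignatura) "Aprobado"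
    else if 7 ≤ nota ∧ nota < 9 then d.insert (PySem.Str.lower asignatura) "Notable"
    else if 9 ≤ nota ∧ nota ≤ 10 then d.insert (PySem.Str.lower asignatura) "Sobresaliente"
    else d) PySem.Dict.empty).items

-- ===== PORT B =====
-- literal port of bisect.bisect_right (binary search, lo/hi, mid = (lo+hi)//2)
def pvBisectRight (a : List Int) (x : Int) (lo hi : Nat) : Nat :=
  if _h : lo < hi then
    let mid := (lo + hi) / 2
    if x < a.getD mid 0 then pvBisectRight a x lo mid else pvBisectRight a x (mid + 1) hi
  else lo
termination_by hi - lo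
decreasing_by all_goals omega

def pvThresholds : List Int := [5, 7, 9]
def pvLabels : List String := ["Suspenso", "Aprobado", "Notable", "Sobresaliente"]

def converionNotasDiccionario_alt (diccionario : List (String × Int)) : List (String × String) :=
  (diccionario.foldl (fun d p =>
    if p.2 ≤ 10 then
      d.insert (PySem.Str.lower p.1) (pvLabels.getD (pvBisectRight pvThresholds p.2 0 pvThresholds.length) "")
    else d) PySem.Dict.empty).items

-- ===== PRECONDITION & SPEC =====
def Spec_converionNotasDiccionario (diccionario : List (String × Int)) (out : List (String × String)) : Prop := out = converionNotasDiccionario_alt diccionario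
instance (diccionario : List (String × Int)) (out : List (String × String)) : Decidable (Spec_converionNotasDiccionario diccionario out) := by unfold Spec_converionNotasDiccionario; infer_instance

-- ===== CLAIM (what is proved, stated in full; the proofs are below) =====
def Claim_equal_converionNotasDiccionario : Prop := ∀ (diccionario : List (String × Int)), Dom_converionNotasDiccionario diccionario → Spec_converionNotasDiccionario diccionario (converionNotasDiccionario diccionario)

-- ===== LEMMAS AND PROOFS =====
lemma pvBisectRight_eval (x : Int) :
    pvBisectRight pvThresholds x 0 pvThresholds.length =
      if x < 5 then 0 else if x < 7 then 1 else if x < 9 then 2 else 3 := by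
  by_cases h5 : x < 5 <;> by_cases h7 : x < 7 <;> by_cases h9 : x < 9 <;>
    simp [pvBisectRight, pvThresholds, h5, h7, h9] <;> omega

-- ===== VERDICT (by name: the statement is the Claim_ definition above) =====
theorem converionNotasDiccionario_spec : Claim_equal_converionNotasDiccionario := by
  intro dic _
  unfold Spec_converionNotasDiccionario converionNotasDiccionario converionNotasDiccionario_alt
  congr 1
  congr 1
  funext d p
  rcases p with ⟨asig, nota⟩
  simp only [pvBisectRight_eval, pvLabels]
  by_cases h5 : nota < 5 <;> by_cases h7 : nota < 7 <;> by_cases h9 : nota < 9 <;>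
    by_cases h10 : nota ≤ 10 <;>
    simp [h5, h7, h9, h10] <;> first | rfl | omega
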